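-- pv_equiv track=rewrite | github.com/edsml-kl121/DataStructure | Graphs/riversizes.py | riverSizes
-- ===== SOURCE A (Python) =====
-- def dfs(row, col, visited, matrix):
--     if row not in range(len(matrix)) or col not in range(len(matrix[0])) or matrix[row][col] == 0 or (row, col) in visited: return 0
--     visited.append((row, col))
--     size = 0
--     directions = [(0, 1), (1, 0), (0, -1), (-1, 0)]
--     for dx, dy in directions:
--         size += dfs(row + dx, col + dy, visited, matrix)
--     return 1 + size
--
-- def riverSizes(matrix):
--     rows, cols = len(matrix), len(matrix[0])
--     visited = []
--     ans = []
--
--     for row in range(rows):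
--         for col in range(cols):
--             if (row, col) not in visited and matrix[row][col] == 1:
--                 size = dfs(row, col, visited, matrix)
--                 ans.append(size)
--     return ans
-- ===== SOURCE B (Python) =====
-- def riverSizes(matrix):
--     rows, cols = len(matrix), len(matrix[0])
--     visited = set()
--     ans = []
--     for row in range(rows):
--         for col in range(cols):
--             if (row, col) in visited or matrix[row][col] != 1:
--                 continue
--             stack = [(row, col)]
--             size = 0
--             while stack:
--                 r, c = stack.pop()
--                 if r < 0 or r >= rows or c < 0 or c >= cols:
--                     continue
--                 if (r, c) in visited or matrix[r][c] == 0: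
--                     continue
--                 visited.add((r, c))
--                 size += 1
--                 stack.extend([(r - 1, c), (r, c - 1), (r + 1, c), (r, c + 1)])
--             ans.append(size)
--     return ans
-- ===== Notes on version B (the rewrite author's own statement) =====
-- stated objective: faster
-- what changed: Replaced the recursive DFS that scans a visited LIST by an iterative, stack-driven flood fill with a visited SET, keeping the same row-major scan and identical output order.
import Mathlib
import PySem

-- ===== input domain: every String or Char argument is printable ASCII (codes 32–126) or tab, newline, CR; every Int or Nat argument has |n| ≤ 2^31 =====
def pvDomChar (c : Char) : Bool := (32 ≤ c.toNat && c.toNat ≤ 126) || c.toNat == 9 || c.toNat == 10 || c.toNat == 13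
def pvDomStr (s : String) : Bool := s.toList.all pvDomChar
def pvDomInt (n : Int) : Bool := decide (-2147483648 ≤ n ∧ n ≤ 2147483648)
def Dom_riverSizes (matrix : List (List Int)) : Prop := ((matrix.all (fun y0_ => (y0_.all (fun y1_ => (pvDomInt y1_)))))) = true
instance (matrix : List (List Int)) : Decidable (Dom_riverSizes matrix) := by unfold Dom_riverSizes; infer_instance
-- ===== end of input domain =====

-- B replaces A's recursive DFS with a visited LIST by an iterative stack-driven flood
-- fill with a visited SET (same row-major scan, identical returned list).

-- shared total cell accessor: matrix[r][c], read only after the in-range guards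
-- (0 on out-of-range access, which Pre_ keeps unreachable where Python would raise)
def pvCell (matrix : List (List Int)) (r c : Int) : Int :=
  (PySem.List.pyGet? ((PySem.List.pyGet? matrix r).getD []) c).getD 0

-- ===== PORT A =====
-- recursive dfs, fueled: fuel rows*cols+1 dominates Python's recursion depth
def pvDfs (matrix : List (List Int)) (fuel : Nat) (row col : Int)
    (visited : List (Int × Int)) : List (Int × Int) × Int :=
  match fuel with
  | 0 => (visited, 0)
  | fuel + 1 =>
    if ¬(0 ≤ row ∧ row < (matrix.length : Int)) ∨
       ¬(0 ≤ col ∧ col < ((matrix.headD []).length : Int)) ∨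
       pvCell matrix row col = 0 ∨ (row, col) ∈ visited then
      (visited, 0)
    else
      let st := [((0 : Int), (1 : Int)), (1, 0), (0, -1), (-1, 0)].foldl
        (fun (acc : List (Int × Int) × Int) d =>
          let r := pvDfs matrix fuel (row + d.1) (col + d.2) acc.1
          (r.1, acc.2 + r.2))
        (visited ++ [(row, col)], 0)
      (st.1, 1 + st.2)

def riverSizes (matrix : List (List Int)) : List Int :=
  let rows : Int := matrix.length
  let cols : Int := (matrix.headD []).length
  ((PySem.List.pyRange 0 rows 1).foldl (fun (st : List (Int × Int) × List Int) row =>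
    (PySem.List.pyRange 0 cols 1).foldl (fun (st : List (Int × Int) × List Int) col =>
      if (row, col) ∉ st.1 ∧ pvCell matrix row col = 1 then
        let r := pvDfs matrix (matrix.length * (matrix.headD []).length + 1) row col st.1
        (r.1, st.2 ++ [r.2])
      else st) st) ([], [])).2

-- ===== PORT B =====
-- the in-bounds cells, used only to measure how many cells remain unvisited
def pvAllCells (matrix : List (List Int)) : List (Int × Int) :=
  (PySem.List.pyRange 0 (matrix.length : Int) 1).flatMap (fun r =>
    (PySem.List.pyRange 0 ((matrix.headD []).length : Int) 1).map (fun c => (r, c)))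

-- how many in-bounds cells are already visited (termination measure only)
def pvClip (matrix : List (List Int)) (v : List (Int × Int)) : Nat :=
  ((pvAllCells matrix).filter (fun p => decide (p ∈ v))).length

theorem pvClip_le (matrix : List (List Int)) (v : List (Int × Int)) :
    pvClip matrix v ≤ (pvAllCells matrix).length :=
  List.length_filter_le _ _

theorem pvMem_allCells (matrix : List (List Int)) (r c : Int)
    (h1 : 0 ≤ r) (h2 : r < (matrix.length : Int)) (h3 : 0 ≤ c)
    (h4 : c < ((matrix.headD []).length : Int)) : (r, c) ∈ pvAllCells matrix := by
  unfold pvAllCells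
  refine List.mem_flatMap_of_mem (PySem.List.mem_pyRange_one.mpr ⟨h1, h2⟩) ?_
  exact List.mem_map_of_mem (PySem.List.mem_pyRange_one.mpr ⟨h3, h4⟩)

theorem pvCountP_lt {α : Type} (l : List α) (p q : α → Bool)
    (h : ∀ x ∈ l, p x = true → q x = true) (x : α) (hx : x ∈ l)
    (hq : q x = true) (hp : ¬ p x = true) : l.countP p < l.countP q := by
  induction l with
  | nil => cases hx
  | cons a t ih =>
    rcases List.mem_cons.mp hx with hx | hx
    · subst hx
      have hm : t.countP p ≤ t.countP q :=
        List.countP_mono_left (fun y hy => h y (List.mem_cons_of_mem _ hy))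
      simp [hp, hq]
      omega
    · have hrec := ih (fun y hy => h y (List.mem_cons_of_mem _ hy)) hx
      have hhd : (if p a = true then 1 else 0) ≤ (if q a = true then 1 else 0) := by
        by_cases hpa : p a = true
        · simp [hpa, h a List.mem_cons_self hpa]
        · simp [hpa]
      simp [List.countP_cons]
      omega

theorem pvClip_append_lt (matrix : List (List Int)) (v : List (Int × Int)) (r c : Int)
    (h1 : 0 ≤ r) (h2 : r < (matrix.length : Int)) (h3 : 0 ≤ c)
    (h4 : c < ((matrix.headD []).length : Int)) (hnv : (r, c) ∉ v) :
    pvClip matrix v < pvClip matrix (v ++ [(r, c)]) := by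
  unfold pvClip
  simp only [← List.countP_eq_length_filter]
  exact pvCountP_lt _ _ _
    (fun x _ hx => by simp_all)
    (r, c) (pvMem_allCells matrix r c h1 h2 h3 h4) (by simp) (by simpa using hnv)

-- iterative flood fill over an explicit stack (the while loop of Source B; the Lean
-- stack is Source B's list reversed, so cons = push, head = pop of the last element)
def pvFlood (matrix : List (List Int)) (stack : List (Int × Int))
    (visited : PySem.Set (Int × Int)) (size : Int) : PySem.Set (Int × Int) × Int :=
  match stack with
  | [] => (visited, size)
  | (r, c) :: rest =>
    if r < 0 ∨ (matrix.length : Int) ≤ r ∨ c < 0 ∨ ((matrix.headD []).length : Int) ≤ c then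
      pvFlood matrix rest visited size
    else if (r, c) ∈ visited ∨ pvCell matrix r c = 0 then
      pvFlood matrix rest visited size
    else
      pvFlood matrix ((r, c + 1) :: (r + 1, c) :: (r, c - 1) :: (r - 1, c) :: rest)
        (PySem.Set.add visited (r, c)) (size + 1)
termination_by ((pvAllCells matrix).length + 1 - pvClip matrix visited, stack.length)
decreasing_by
  · exact Prod.Lex.right _ (by simp)
  · exact Prod.Lex.right _ (by simp)
  · apply Prod.Lex.left
    have hadd : PySem.Set.add visited (r, c) = visited ++ [(r, c)] := by
      simp_all [PySem.Set.add, PySem.Set.contains]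
    rw [hadd]
    have h1 := pvClip_append_lt matrix visited r c (by omega) (by omega) (by omega) (by omega) (by tauto)
    have h2 := pvClip_le matrix (visited ++ [(r, c)])
    omega

def riverSizes_alt (matrix : List (List Int)) : List Int :=
  let rows : Int := matrix.length
  let cols : Int := (matrix.headD []).length
  ((PySem.List.pyRange 0 rows 1).foldl (fun (st : PySem.Set (Int × Int) × List Int) row =>
    (PySem.List.pyRange 0 cols 1).foldl (fun (st : PySem.Set (Int × Int) × List Int) col =>
      if (row, col) ∈ st.1 ∨ pvCell matrix row col ≠ 1 then st
      else
        let p := pvFlood matrix [(row, col)] st.1 0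
        (p.1, st.2 ++ [p.2])) st) (PySem.Set.empty, [])).2

-- ===== PRECONDITION & SPEC =====
-- Pre_ excludes exactly the inputs where Python A raises IndexError: the empty
-- matrix (len(matrix[0])) and matrices with a row shorter than the first row
-- (matrix[row][col] with col < len(matrix[0])).
def Pre_riverSizes (matrix : List (List Int)) : Prop :=
  matrix ≠ [] ∧ ∀ r ∈ matrix, (matrix.headD []).length ≤ r.length
instance (matrix : List (List Int)) : Decidable (Pre_riverSizes matrix) := by
  unfold Pre_riverSizes; infer_instance
def pvWitness_riverSizes : List (List Int) := [[1, 0], [0, 1]]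

def Spec_riverSizes (matrix : List (List Int)) (out : List Int) : Prop := out = riverSizes_alt matrix
instance (matrix : List (List Int)) (out : List Int) : Decidable (Spec_riverSizes matrix out) := by unfold Spec_riverSizes; infer_instance

-- ===== CLAIM (what is proved, stated in full; the proofs are below) =====
def Claim_equal_riverSizes : Prop := ∀ (matrix : List (List Int)), Dom_riverSizes matrix → Pre_riverSizes matrix → Spec_riverSizes matrix (riverSizes matrix)

-- ===== LEMMAS AND PROOFS =====

theorem pvFlood_nil (m : List (List Int)) (v : List (Int × Int)) (s : Int) :
    pvFlood m [] v s = (v, s) := by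
  rw [pvFlood]

theorem pvFlood_skip (m : List (List Int)) (r c : Int) (rest v : List (Int × Int)) (s : Int)
    (h : (r < 0 ∨ (m.length : Int) ≤ r ∨ c < 0 ∨ ((m.headD []).length : Int) ≤ c) ∨
         ((r, c) ∈ v ∨ pvCell m r c = 0)) :
    pvFlood m ((r, c) :: rest) v s = pvFlood m rest v s := by
  rw [pvFlood]
  split_ifs with h1 h2 <;> first | rfl | tauto

theorem pvFlood_mark (m : List (List Int)) (r c : Int) (rest v : List (Int × Int)) (s : Int)
    (h1 : ¬(r < 0 ∨ (m.length : Int) ≤ r ∨ c < 0 ∨ ((m.headD []).length : Int) ≤ c))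
    (h2 : ¬((r, c) ∈ v ∨ pvCell m r c = 0)) :
    pvFlood m ((r, c) :: rest) v s =
      pvFlood m ((r, c + 1) :: (r + 1, c) :: (r, c - 1) :: (r - 1, c) :: rest)
        (v ++ [(r, c)]) (s + 1) := by
  rw [pvFlood]
  rw [if_neg h1, if_neg h2]
  have : PySem.Set.add v (r, c) = v ++ [(r, c)] := by
    simp_all [PySem.Set.add, PySem.Set.contains]
  rw [this]

theorem pvDfs_bad (m : List (List Int)) (fuel : Nat) (r c : Int) (v : List (Int × Int))
    (h : ¬(0 ≤ r ∧ r < (m.length : Int)) ∨ ¬(0 ≤ c ∧ c < ((m.headD []).length : Int)) ∨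
         pvCell m r c = 0 ∨ (r, c) ∈ v) :
    pvDfs m (fuel + 1) r c v = (v, 0) := by
  simp only [pvDfs, if_pos h]

theorem pvDfs_good (m : List (List Int)) (fuel : Nat) (r c : Int) (v : List (Int × Int))
    (h : ¬(¬(0 ≤ r ∧ r < (m.length : Int)) ∨ ¬(0 ≤ c ∧ c < ((m.headD []).length : Int)) ∨
         pvCell m r c = 0 ∨ (r, c) ∈ v)) :
    pvDfs m (fuel + 1) r c v =
      (let a1 := pvDfs m fuel r (c + 1) (v ++ [(r, c)])
       let a2 := pvDfs m fuel (r + 1) c a1.1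
       let a3 := pvDfs m fuel r (c - 1) a2.1
       let a4 := pvDfs m fuel (r - 1) c a3.1
       (a4.1, 1 + (0 + a1.2 + a2.2 + a3.2 + a4.2))) := by
  simp only [pvDfs, if_neg h, List.foldl]
  ring_nf

theorem pvDfs_prefix (m : List (List Int)) :
    ∀ (fuel : Nat) (r c : Int) (v : List (Int × Int)), v <+: (pvDfs m fuel r c v).1 := by
  intro fuel
  induction fuel with
  | zero => intro r c v; exact List.prefix_rfl
  | succ f ih =>
    intro r c v
    by_cases h : ¬(0 ≤ r ∧ r < (m.length : Int)) ∨ ¬(0 ≤ c ∧ c < ((m.headD []).length : Int)) ∨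
        pvCell m r c = 0 ∨ (r, c) ∈ v
    · rw [pvDfs_bad m f r c v h]
    · rw [pvDfs_good m f r c v h]
      dsimp only
      refine List.IsPrefix.trans (List.prefix_append v [(r, c)]) ?_
      refine (ih r (c + 1) _).trans ?_
      refine (ih (r + 1) c _).trans ?_
      refine (ih r (c - 1) _).trans ?_
      exact ih (r - 1) c _

theorem pvClip_mono (m : List (List Int)) {v w : List (Int × Int)} (h : v ⊆ w) :
    pvClip m v ≤ pvClip m w := by
  unfold pvClip
  simp only [← List.countP_eq_length_filter]
  exact List.countP_mono_left (fun x _ hx => by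
    simp only [decide_eq_true_eq] at hx ⊢
    exact h hx)

theorem pvAllCells_length (m : List (List Int)) :
    (pvAllCells m).length = m.length * (m.headD []).length := by
  simp [pvAllCells, List.length_flatMap, PySem.List.length_pyRange_one,
    List.map_const', List.sum_replicate, smul_eq_mul]

theorem pvFlood_dfs (m : List (List Int)) :
    ∀ (fuel : Nat) (v : List (Int × Int)) (stack : List (Int × Int)) (size : Int) (r c : Int),
      (pvAllCells m).length + 1 - pvClip m v ≤ fuel →
      pvFlood m ((r, c) :: stack) v size
        = pvFlood m stack (pvDfs m fuel r c v).1 (size + (pvDfs m fuel r c v).2) := by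
  intro fuel
  induction fuel with
  | zero =>
    intro v _ _ _ _ h
    have := pvClip_le m v
    omega
  | succ f ih =>
    intro v stack size r c h
    by_cases hb : ¬(0 ≤ r ∧ r < (m.length : Int)) ∨ ¬(0 ≤ c ∧ c < ((m.headD []).length : Int)) ∨
        pvCell m r c = 0 ∨ (r, c) ∈ v
    · rw [pvDfs_bad m f r c v hb, pvFlood_skip m r c stack v size ?_]
      · norm_num
      · rcases hb with h1 | h1 | h1 | h1
        · left; omega
        · left; omega
        · right; right; exact h1
        · right; left; exact h1
    · have hb' := hb
      push Not at hb'
      obtain ⟨⟨hr0, hr1⟩, ⟨hc0, hc1⟩, hcell, hmem⟩ := hb'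
      rw [pvFlood_mark m r c stack v size (by omega) (by tauto)]
      rw [pvDfs_good m f r c v hb]
      dsimp only
      have hlt : pvClip m v < pvClip m (v ++ [(r, c)]) :=
        pvClip_append_lt m v r c hr0 hr1 hc0 hc1 hmem
      have hle : pvClip m (v ++ [(r, c)]) ≤ (pvAllCells m).length := pvClip_le m _
      have hf0 : (pvAllCells m).length + 1 - pvClip m (v ++ [(r, c)]) ≤ f := by omega
      rw [ih (v ++ [(r, c)]) _ (size + 1) r (c + 1) hf0]
      have hm1 : pvClip m (v ++ [(r, c)]) ≤ pvClip m (pvDfs m f r (c + 1) (v ++ [(r, c)])).1 :=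
        pvClip_mono m (pvDfs_prefix m f r (c + 1) _).subset
      rw [ih _ _ _ (r + 1) c (by omega)]
      have hm2 := pvClip_mono m (pvDfs_prefix m f (r + 1) c (pvDfs m f r (c + 1) (v ++ [(r, c)])).1).subset
      rw [ih _ _ _ r (c - 1) (by omega)]
      have hm3 := pvClip_mono m (pvDfs_prefix m f r (c - 1)
        (pvDfs m f (r + 1) c (pvDfs m f r (c + 1) (v ++ [(r, c)])).1).1).subset
      rw [ih _ _ _ (r - 1) c (by omega)]
      congr 1
      ring

theorem pvFoldl_ext {α β : Type} (f g : β → α → β) (l : List α) (init : β)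
    (h : ∀ b a, f b a = g b a) : l.foldl f init = l.foldl g init := by
  induction l generalizing init with
  | nil => rfl
  | cons a t ih => simp only [List.foldl, h]; exact ih _

theorem riverSizes_step (matrix : List (List Int)) (row : Int)
    (st : List (Int × Int) × List Int) (col : Int) :
    (if (row, col) ∉ st.1 ∧ pvCell matrix row col = 1 then
        let r := pvDfs matrix (matrix.length * (matrix.headD []).length + 1) row col st.1
        (r.1, st.2 ++ [r.2])
      else st) =
    (if (row, col) ∈ st.1 ∨ pvCell matrix row col ≠ 1 then st
      else
        let p := pvFlood matrix [(row, col)] st.1 0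
        (p.1, st.2 ++ [p.2])) := by
  by_cases hg : (row, col) ∈ st.1 ∨ pvCell matrix row col ≠ 1
  · rw [if_pos hg, if_neg (by tauto)]
  · rw [if_neg hg, if_pos (by tauto)]
    have hfuel : (pvAllCells matrix).length + 1 - pvClip matrix st.1 ≤
        matrix.length * (matrix.headD []).length + 1 := by
      have := pvAllCells_length matrix
      omega
    have := pvFlood_dfs matrix (matrix.length * (matrix.headD []).length + 1)
      st.1 [] 0 row col hfuel
    rw [pvFlood_nil] at this
    dsimp only
    rw [this]
    norm_num

theorem riverSizes_main (matrix : List (List Int)) : riverSizes matrix = riverSizes_alt matrix := by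
  unfold riverSizes riverSizes_alt
  dsimp only
  congr 1
  refine pvFoldl_ext _ _ _ _ (fun st row => ?_)
  exact pvFoldl_ext _ _ _ _ (fun st col => riverSizes_step matrix row st col)

-- ===== VERDICT (by name: the statement is the Claim_ definition above) =====
theorem riverSizes_spec : Claim_equal_riverSizes := by
  intro matrix _ _
  unfold Spec_riverSizes
  exact riverSizes_main matrix
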